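-- pv_equiv track=rewrite | github.com/ilkin0/devops-academy-learning | python/exercise-8/7.py | replace_with_comma
-- ===== SOURCE A (Python) =====
-- def replace_with_comma(input_data):
--     new_string = ''
--     for c in input_data:
--         if c == ' ':
--             new_string += ','
--             continue
--         new_string += c
--
--     return new_string
-- ===== SOURCE B (Python) =====
-- def replace_with_comma(input_data):
--     return input_data.replace(' ', ',')
-- ===== Notes on version B (the rewrite author's own statement) =====
-- stated objective: idiomatic
-- what changed: Replaces the explicit per-character loop with string concatenation by a single str.replace built-in call.
import Mathlib
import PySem

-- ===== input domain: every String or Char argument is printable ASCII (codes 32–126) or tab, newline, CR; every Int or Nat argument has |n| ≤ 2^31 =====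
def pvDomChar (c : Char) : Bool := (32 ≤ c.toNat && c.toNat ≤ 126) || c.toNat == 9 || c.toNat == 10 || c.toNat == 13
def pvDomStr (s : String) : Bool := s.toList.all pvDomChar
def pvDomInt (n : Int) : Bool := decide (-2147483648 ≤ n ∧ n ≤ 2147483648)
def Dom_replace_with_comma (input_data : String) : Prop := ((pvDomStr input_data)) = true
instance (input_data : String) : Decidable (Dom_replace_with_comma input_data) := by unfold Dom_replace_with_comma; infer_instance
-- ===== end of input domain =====

-- B replaces A's explicit character loop and concatenation accumulator by one str.replace(' ', ',') call (idiomatic).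

-- ===== PORT A =====
-- loop: new_string = ''; for c in input_data: append ',' if c == ' ' else c
def replace_with_comma (input_data : String) : String :=
  input_data.toList.foldl
    (fun new_string c =>
      if c = ' ' then new_string ++ "," else new_string ++ String.singleton c) ""

-- ===== PORT B =====
def replace_with_comma_alt (input_data : String) : String :=
  PySem.Str.replace input_data " " ","

-- ===== PRECONDITION & SPEC =====
def Spec_replace_with_comma (input_data : String) (out : String) : Prop := out = replace_with_comma_alt input_data
instance (input_data : String) (out : String) : Decidable (Spec_replace_with_comma input_data out) := by unfold Spec_replace_with_comma; infer_instance

-- ===== CLAIM (what is proved, stated in full; the proofs are below) =====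
def Claim_equal_replace_with_comma : Prop := ∀ (input_data : String), Dom_replace_with_comma input_data → Spec_replace_with_comma input_data (replace_with_comma input_data)

-- ===== LEMMAS AND PROOFS =====

-- the loop's result, read off on character lists: a map over the input
theorem replace_loop_toList (l : List Char) (s : String) :
    (l.foldl (fun new_string c =>
        if c = ' ' then new_string ++ "," else new_string ++ String.singleton c) s).toList
      = s.toList ++ l.map (fun c => if c = ' ' then ',' else c) := by
  induction l generalizing s with
  | nil => simp
  | cons c t ih =>
      rw [List.foldl_cons]
      by_cases hc : c = ' '
      · rw [if_pos hc, ih]; simp [hc]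
      · rw [if_neg hc, ih]; simp [String.singleton, hc]

-- Chars.replace.go with a single-char pattern is a reverse-accumulator map
theorem replace_go_single (l acc : List Char) :
    PySem.Chars.replace.go [' '] [','] l.length l acc
      = acc.reverse ++ l.map (fun c => if c = ' ' then ',' else c) := by
  induction l generalizing acc with
  | nil => simp [PySem.Chars.replace.go]
  | cons c t ih =>
      by_cases hc : c = ' '
      · simp [PySem.Chars.replace.go, hc, List.isPrefixOf, ih]
      · simp [PySem.Chars.replace.go, List.isPrefixOf, hc, ih]
        exact fun h => absurd h.symm hc

theorem replace_eq_map (l : List Char) :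
    PySem.Chars.replace l [' '] [','] = l.map (fun c => if c = ' ' then ',' else c) := by
  simpa [PySem.Chars.replace] using replace_go_single l []

-- ===== VERDICT (by name: the statement is the Claim_ definition above) =====
theorem replace_with_comma_spec : Claim_equal_replace_with_comma := by
  intro input_data _
  unfold Spec_replace_with_comma replace_with_comma replace_with_comma_alt
  apply String.toList_injective
  rw [PySem.Str.toList_replace, replace_loop_toList]
  simp [replace_eq_map]
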